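-- pv_equiv track=rewrite | github.com/Thegamefire/QuickEasyInstaller | main.py | get_package_seed
-- ===== SOURCE A (Python) =====
-- import math
--
-- alphabet = '0abcdefghijklmopqrstuvwxyz'  # There is no 'n' because 'n' is the split character in the package seeds
--
-- application_decode_dict = {
--     1: 'steam',
--     2: 'epicgames',
--     3: 'ubisoftconnect',
--     4: 'battlenet',
--     5: 'eadesktop',
--     6: 'discord',
--     7: 'signal',
--     8: 'whatsapp',
--     9: 'spotify',
--     10: 'stremio',
--     11: 'mpv',
--     12: 'vlc',
--     13: 'batterymode',
--     14: 'wincompose',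
--     15: 'powertoys',
--     16: 'iobitunlocker',
--     17: 'everything',
--     18: 'windirstat',
--     19: 'tcnoaccount',
--     20: 'qbittorrent',
--     21: 'winrar',
--     22: 'fdm',
--     23: 'megasync',
--     24: 'audacity',
--     25: 'paintnet',
--     26: 'blender',
--     27: 'ngenuity',
--     28: 'vigem',
--     29: 'paragonpartition',
--     30: 'firefox',
--     31: 'malwarebytes',
--     32: 'obs',
--     33: 'parsec',
--     34: 'python',
--     35: 'pycharm',
--     36: 'git',
--     37: 'seb',
--     38: 'tor'
-- }
--
-- def get_package_seed(application_list):
--     """ Get the package seed of an application list """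
--     seed = ''
--     seed_version = '01'
--     seed = seed + seed_version
--     for application in application_list:
--         application_number = 0
--         # Get application number from dict
--         for i, item in application_decode_dict.items():
--             if item == application:
--                 application_number = i
--                 break
--
--         # Convert number into seed-code
--         if application_number <= 34:
--             if application_number < 10:
--                 app_code = str(application_number)
--             else:
--                 app_code = str(alphabet[application_number - 9])
--         else:  # 2 character long code
--             app_code = 'n'
--             # First character in code
--             if math.floor(application_number / 35) <= 9:
--                 app_code += str(math.floor(application_number / 35))
--             else:
--                 app_code += str(alphabet[math.floor(application_number) - 9])
--             # Second character in code
--             if application_number % 35 <= 9: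
--                 app_code += str(application_number % 35)
--             else:
--                 app_code += str(alphabet[application_number % 35 - 9])
--
--         seed += app_code
--     return seed
-- ===== SOURCE B (Python) =====
-- alphabet = '0abcdefghijklmopqrstuvwxyz'  # no 'n': it is the split character in package seeds
--
-- application_decode_dict = {
--     1: 'steam', 2: 'epicgames', 3: 'ubisoftconnect', 4: 'battlenet',
--     5: 'eadesktop', 6: 'discord', 7: 'signal', 8: 'whatsapp', 9: 'spotify',
--     10: 'stremio', 11: 'mpv', 12: 'vlc', 13: 'batterymode', 14: 'wincompose',
--     15: 'powertoys', 16: 'iobitunlocker', 17: 'everything', 18: 'windirstat',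
--     19: 'tcnoaccount', 20: 'qbittorrent', 21: 'winrar', 22: 'fdm',
--     23: 'megasync', 24: 'audacity', 25: 'paintnet', 26: 'blender',
--     27: 'ngenuity', 28: 'vigem', 29: 'paragonpartition', 30: 'firefox',
--     31: 'malwarebytes', 32: 'obs', 33: 'parsec', 34: 'python',
--     35: 'pycharm', 36: 'git', 37: 'seb', 38: 'tor'
-- }
--
-- # The 35 base-35 digit symbols, in the seed's code order.
-- DIGITS = '0123456789' + alphabet[1:]
--
-- def _codes():
--     """Enumerate seed codes in counting order: all one-char codes, then all
--     'n'-prefixed two-char codes — no per-number arithmetic anywhere."""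
--     for c in DIGITS[1:]:
--         yield c
--     for hi in DIGITS[1:]:
--         for lo in DIGITS:
--             yield 'n' + hi + lo
--
-- # Pair the application names (dict order = numbers 1, 2, 3, ...) with the
-- # code stream; zip stops at the shorter sequence.
-- _TABLE = dict(zip(application_decode_dict.values(), _codes()))
--
-- def get_package_seed(application_list):
--     """ Get the package seed of an application list """
--     return '01' + ''.join(_TABLE.get(app, '0') for app in application_list)
-- ===== Notes on version B (the rewrite author's own statement) =====
-- stated objective: simpler
-- what changed: B does no per-number encoding arithmetic at all: it enumerates every seed code once in counting order (all one-char codes, then the 'n'-prefixed two-char codes), zips this stream with the dict's names to build a table, and produces the seed as '01' plus one table-driven join over the input, removing A's inner dict scan and all conversion branches.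
import Mathlib
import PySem

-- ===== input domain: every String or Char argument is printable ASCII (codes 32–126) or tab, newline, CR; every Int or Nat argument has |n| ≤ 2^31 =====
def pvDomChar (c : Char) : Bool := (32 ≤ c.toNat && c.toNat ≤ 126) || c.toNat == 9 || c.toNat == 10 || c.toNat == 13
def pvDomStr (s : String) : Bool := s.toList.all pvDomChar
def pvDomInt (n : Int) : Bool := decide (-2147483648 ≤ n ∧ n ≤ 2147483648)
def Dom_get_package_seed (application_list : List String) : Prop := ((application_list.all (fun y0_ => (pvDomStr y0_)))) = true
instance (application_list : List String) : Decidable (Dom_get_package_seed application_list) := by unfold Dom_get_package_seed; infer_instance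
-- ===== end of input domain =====

-- B drops A's per-item dict scan and per-number conversion arithmetic: it enumerates all
-- seed codes in counting order once, zips them with the names, and does one table-driven
-- pass; objective: simpler.

-- shared module-level data (alphabet, application_decode_dict)
def pvAlphabet : List Char := "0abcdefghijklmopqrstuvwxyz".toList

def pvDecode : List (Int × String) :=
  [(1, "steam"), (2, "epicgames"), (3, "ubisoftconnect"), (4, "battlenet"),
   (5, "eadesktop"), (6, "discord"), (7, "signal"), (8, "whatsapp"), (9, "spotify"),
   (10, "stremio"), (11, "mpv"), (12, "vlc"), (13, "batterymode"), (14, "wincompose"),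
   (15, "powertoys"), (16, "iobitunlocker"), (17, "everything"), (18, "windirstat"),
   (19, "tcnoaccount"), (20, "qbittorrent"), (21, "winrar"), (22, "fdm"),
   (23, "megasync"), (24, "audacity"), (25, "paintnet"), (26, "blender"),
   (27, "ngenuity"), (28, "vigem"), (29, "paragonpartition"), (30, "firefox"),
   (31, "malwarebytes"), (32, "obs"), (33, "parsec"), (34, "python"),
   (35, "pycharm"), (36, "git"), (37, "seb"), (38, "tor")]

-- ===== PORT A =====
-- A's inner 'for i, item in application_decode_dict.items(): if item == application: …; break'
-- with application_number initialised to 0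
def pvA_findNum (application : String) : List (Int × String) → Int
  | [] => 0
  | (i, item) :: rest => if item == application then i else pvA_findNum application rest

-- str(alphabet[j]): one character as a one-char list; .getD [] totalises the (never-hit) IndexError
def pvA_alpha (j : Int) : List Char :=
  ((PySem.List.pyGet? pvAlphabet j).map (fun c => [c])).getD []

-- A's number → seed-code conversion, branch for branch (on List Char)
def pvA_appCode (n : Int) : List Char :=
  if n ≤ 34 then
    if n < 10 then PySem.Int.toChars n
    else pvA_alpha (n - 9)
  else
    let c1 := if PySem.Int.floordiv n 35 ≤ 9 then PySem.Int.toChars (PySem.Int.floordiv n 35)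
              else pvA_alpha (n - 9)   -- A writes math.floor(application_number) - 9 here
    let c2 := if PySem.Int.mod n 35 ≤ 9 then PySem.Int.toChars (PySem.Int.mod n 35)
              else pvA_alpha (PySem.Int.mod n 35 - 9)
    'n' :: (c1 ++ c2)

def get_package_seed (application_list : List String) : String :=
  String.ofList (application_list.foldl
    (fun seed app => seed ++ pvA_appCode (pvA_findNum app pvDecode))
    ['0', '1'])

-- ===== PORT B =====
-- DIGITS = '0123456789' + alphabet[1:]
def pvDigits : List Char := "0123456789".toList ++ pvAlphabet.drop 1

-- _codes(): one-char codes, then the 'n'-prefixed two-char codes, in counting order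
def pvB_codes : List (List Char) :=
  (pvDigits.drop 1).map (fun c => [c]) ++
  (pvDigits.drop 1).flatMap (fun hi => pvDigits.map (fun lo => ['n', hi, lo]))

-- _TABLE = dict(zip(application_decode_dict.values(), _codes())); names are distinct
def pvB_table : List (String × List Char) := (pvDecode.map Prod.snd).zip pvB_codes

-- _TABLE.get(app, '0') (first match)
def pvB_lookup (app : String) : List (String × List Char) → List Char
  | [] => ['0']
  | (name, code) :: rest => if name == app then code else pvB_lookup app rest

def get_package_seed_alt (application_list : List String) : String :=
  String.ofList ('0' :: '1' :: application_list.flatMap (fun app => pvB_lookup app pvB_table))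

-- ===== PRECONDITION & SPEC =====
def Spec_get_package_seed (application_list : List String) (out : String) : Prop := out = get_package_seed_alt application_list
instance (application_list : List String) (out : String) : Decidable (Spec_get_package_seed application_list out) := by unfold Spec_get_package_seed; infer_instance

-- ===== CLAIM =====
def Claim_equal_get_package_seed : Prop := ∀ (application_list : List String), Dom_get_package_seed application_list → Spec_get_package_seed application_list (get_package_seed application_list)

-- ===== LEMMAS AND PROOFS =====

-- B's zipped table carries, for each name, exactly the code A's arithmetic produces
theorem pvTable_eq : pvB_table = pvDecode.map (fun p => (p.2, pvA_appCode p.1)) := by decide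

theorem pvA_appCode_zero : pvA_appCode 0 = ['0'] := by decide

-- scanning L for the number then converting = first-match lookup in the per-name code table
theorem pvScan_eq_lookup (app : String) :
    ∀ L : List (Int × String),
      pvA_appCode (pvA_findNum app L) = pvB_lookup app (L.map (fun p => (p.2, pvA_appCode p.1))) := by
  intro L
  induction L with
  | nil => simpa [pvA_findNum, pvB_lookup] using pvA_appCode_zero
  | cons hd tl ih =>
    obtain ⟨i, item⟩ := hd
    simp only [pvA_findNum, List.map_cons, pvB_lookup]
    by_cases hb : item == app
    · simp [hb]
    · simp only [hb, Bool.false_eq_true, if_false]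
      exact ih

-- ===== VERDICT =====
theorem get_package_seed_spec : Claim_equal_get_package_seed := by
  intro l _
  unfold Spec_get_package_seed get_package_seed get_package_seed_alt
  rw [PySem.List.foldl_append_eq_flatMap]
  congr 1
  simp only [List.cons_append, List.nil_append]
  congr 2
  rw [pvTable_eq]
  exact List.flatMap_congr (fun app _ => pvScan_eq_lookup app pvDecode)
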